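-- pv_equiv track=rewrite | github.com/RachamallaYeswanthReddy/LeetCode_ | 2038-remove-colored-pieces-if-both-neighbors-are-the-same-color/2038-remove-colored-pieces-if-both-neighbors-are-the-same-color.py | winnerOfGame
-- ===== SOURCE A (Python) =====
-- def winnerOfGame(colors: str) -> bool:
--     point_alice = 0
--     point_bob = 0
--
--     for i in range(1,len(colors)-1):
--         if colors[i-1]==colors[i]==colors[i+1] :
--             if colors[i] =='A':
--                 point_alice +=1
--             else:
--                 point_bob += 1
--     return point_alice-point_bob>=1
-- ===== SOURCE B (Python) =====
-- def winnerOfGame(colors: str) -> bool: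
--     # Run-length decomposition: each maximal run of length L of one char
--     # contributes max(0, L-2) removable pieces to that player.
--     def flush(pts, run_char, run_len):
--         if run_char is None:
--             return pts
--         a, b = pts
--         gain = max(0, run_len - 2)
--         return (a + gain, b) if run_char == 'A' else (a, b + gain)
--
--     pts, run_char, run_len = (0, 0), None, 0
--     for c in colors:
--         if run_char == c:
--             run_len += 1
--         else:
--             pts, run_char, run_len = flush(pts, run_char, run_len), c, 1
--     a, b = flush(pts, run_char, run_len)
--     return a - b >= 1
-- ===== Notes on version B (the rewrite author's own statement) =====
-- stated objective: alternative
-- what changed: Replaces the per-index triple test (three subscript lookups per position) with a single pass that tracks maximal runs of identical characters and adds max(0, L-2) per run of length L to the owning player.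
import Mathlib
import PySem

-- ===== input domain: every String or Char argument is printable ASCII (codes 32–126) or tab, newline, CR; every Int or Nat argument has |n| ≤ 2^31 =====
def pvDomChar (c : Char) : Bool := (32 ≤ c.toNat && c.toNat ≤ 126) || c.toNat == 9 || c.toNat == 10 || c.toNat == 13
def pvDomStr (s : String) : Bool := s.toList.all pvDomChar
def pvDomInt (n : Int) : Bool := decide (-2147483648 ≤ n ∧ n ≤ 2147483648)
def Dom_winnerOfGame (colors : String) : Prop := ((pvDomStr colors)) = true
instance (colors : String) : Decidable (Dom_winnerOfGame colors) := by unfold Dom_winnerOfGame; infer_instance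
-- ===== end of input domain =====

-- B replaces A's per-index triple test with a one-pass run-length scan (max(0, L-2) per run); alternative decomposition, same value.

-- ===== PORT A =====
def winnerOfGame (colors : String) : Bool :=
  let cs := colors.toList
  let pts := (PySem.List.pyRange 1 (PySem.List.len cs - 1) 1).foldl
    (fun (pt : Int × Int) i =>
      if PySem.List.pyGetD cs (i - 1) ' ' = PySem.List.pyGetD cs i ' ' ∧
         PySem.List.pyGetD cs i ' ' = PySem.List.pyGetD cs (i + 1) ' ' then
        if PySem.List.pyGetD cs i ' ' = 'A' then (pt.1 + 1, pt.2) else (pt.1, pt.2 + 1)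
      else pt) (0, 0)
  decide (pts.1 - pts.2 ≥ 1)

-- ===== PORT B =====
def pvFlush (pt : Int × Int) (rc : Option Char) (rl : Int) : Int × Int :=
  match rc with
  | none => pt
  | some c => if c = 'A' then (pt.1 + max 0 (rl - 2), pt.2) else (pt.1, pt.2 + max 0 (rl - 2))

def pvStep (st : (Int × Int) × Option Char × Int) (c : Char) : (Int × Int) × Option Char × Int :=
  if st.2.1 = some c then (st.1, st.2.1, st.2.2 + 1)
  else (pvFlush st.1 st.2.1 st.2.2, some c, 1)

def winnerOfGame_alt (colors : String) : Bool :=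
  let st := colors.toList.foldl pvStep ((0, 0), none, 0)
  let pts := pvFlush st.1 st.2.1 st.2.2
  decide (pts.1 - pts.2 ≥ 1)

-- ===== PRECONDITION & SPEC =====
def Spec_winnerOfGame (colors : String) (out : Bool) : Prop := out = winnerOfGame_alt colors
instance (colors : String) (out : Bool) : Decidable (Spec_winnerOfGame colors out) := by unfold Spec_winnerOfGame; infer_instance

-- ===== CLAIM (what is proved, stated in full; the proofs are below) =====
def Claim_equal_winnerOfGame : Prop := ∀ (colors : String), Dom_winnerOfGame colors → Spec_winnerOfGame colors (winnerOfGame colors)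

-- ===== LEMMAS AND PROOFS =====

-- triple counts (alice, bob): number of windows x=y=z with y='A' resp. y≠'A'
def pvTri : List Char → Int × Int
  | x :: y :: z :: t =>
    let p := pvTri (y :: z :: t)
    if x = y ∧ y = z then (if y = 'A' then (p.1 + 1, p.2) else (p.1, p.2 + 1)) else p
  | _ => (0, 0)

theorem pvTri_short (l : List Char) (h : l.length ≤ 2) : pvTri l = (0, 0) := by
  match l, h with
  | [], _ => rfl
  | [x], _ => rfl
  | [x, y], _ => rfl

theorem pvTri_replicate (m : Nat) (c : Char) :
    pvTri (List.replicate m c) =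
      (if c = 'A' then (max 0 ((m : Int) - 2), 0) else (0, max 0 ((m : Int) - 2))) := by
  induction m with
  | zero => simp [pvTri_short]
  | succ n ih =>
    by_cases hn : n ≤ 1
    · interval_cases n <;> simp [pvTri_short]
    · obtain ⟨k, rfl⟩ : ∃ k, n = k + 2 := ⟨n - 2, by omega⟩
      have hshape : List.replicate (k + 2 + 1) c = c :: c :: c :: List.replicate k c := by
        simp [List.replicate_succ]
      have hshape2 : (c :: c :: List.replicate k c) = List.replicate (k + 2) c := by
        simp [List.replicate_succ]
      rw [hshape]
      show (if c = c ∧ c = c then _ else _) = _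
      rw [if_pos ⟨rfl, rfl⟩, hshape2, ih]
      split <;> simp <;> omega

theorem pvTri_run (m : Nat) (c x : Char) (t : List Char) (hne : c ≠ x) :
    pvTri (List.replicate m c ++ x :: t) =
      (if c = 'A' then ((pvTri (x :: t)).1 + max 0 ((m : Int) - 2), (pvTri (x :: t)).2)
       else ((pvTri (x :: t)).1, (pvTri (x :: t)).2 + max 0 ((m : Int) - 2))) := by
  induction m with
  | zero => simp
  | succ n ih =>
    by_cases hn : n ≤ 1
    · interval_cases n
      · -- list = c :: x :: t
        simp only [List.replicate_succ, List.replicate_zero, List.nil_append, List.cons_append]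
        cases t with
        | nil => simp [pvTri_short]
        | cons y t' =>
          show (if c = x ∧ x = y then _ else _) = _
          rw [if_neg (by tauto)]
          split <;> simp
      · -- list = c :: c :: x :: t
        simp only [List.replicate_succ, List.replicate_zero, List.nil_append, List.cons_append]
        show (if c = c ∧ c = x then _ else _) = _
        rw [if_neg (by tauto)]
        have h1 := ih
        simp only [List.replicate_succ, List.replicate_zero, List.nil_append,
          List.cons_append] at h1
        rw [h1]
        split <;> simp
    · obtain ⟨k, rfl⟩ : ∃ k, n = k + 2 := ⟨n - 2, by omega⟩
      have hshape : List.replicate (k + 2 + 1) c ++ x :: t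
          = c :: c :: c :: (List.replicate k c ++ x :: t) := by
        simp [List.replicate_succ]
      have hshape2 : (c :: c :: (List.replicate k c ++ x :: t))
          = List.replicate (k + 2) c ++ x :: t := by
        simp [List.replicate_succ]
      rw [hshape]
      show (if c = c ∧ c = c then _ else _) = _
      rw [if_pos ⟨rfl, rfl⟩, hshape2, ih]
      split <;> simp <;> omega

-- A's loop characterised via pvTri
theorem A_loop (m : Nat) : ∀ (cs : List Char) (k : Nat) (a b : Int), cs.length ≤ k + m →
    (PySem.List.pyRange ((k : Int) + 1) ((cs.length : Int) - 1) 1).foldl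
      (fun (pt : Int × Int) i =>
        if PySem.List.pyGetD cs (i - 1) ' ' = PySem.List.pyGetD cs i ' ' ∧
           PySem.List.pyGetD cs i ' ' = PySem.List.pyGetD cs (i + 1) ' ' then
          if PySem.List.pyGetD cs i ' ' = 'A' then (pt.1 + 1, pt.2) else (pt.1, pt.2 + 1)
        else pt) (a, b)
      = (a + (pvTri (cs.drop k)).1, b + (pvTri (cs.drop k)).2) := by
  induction m with
  | zero =>
    intro cs k a b hlen
    rw [PySem.List.pyRange_one_eq_nil (by omega)]
    rw [List.drop_eq_nil_of_le (by omega)]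
    simp [pvTri]
  | succ n ih =>
    intro cs k a b hlen
    by_cases hsmall : cs.length ≤ k + 2
    · rw [PySem.List.pyRange_one_eq_nil (by omega)]
      rw [pvTri_short _ (by simp; omega)]
      simp
    · have hk0 : k < cs.length := by omega
      have hk1 : k + 1 < cs.length := by omega
      have hk2 : k + 2 < cs.length := by omega
      rw [PySem.List.pyRange_one_cons (by omega)]
      simp only [List.foldl_cons]
      have g0 : PySem.List.pyGetD cs ((k : Int) + 1 - 1) ' ' = cs[k] := by
        rw [show (k : Int) + 1 - 1 = (k : Int) by ring]
        rw [PySem.List.pyGetD_eq_getElem cs ' ' (by omega) (by omega)]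
        simp [show ((k : Int)).toNat = k from by omega]
      have g1 : PySem.List.pyGetD cs ((k : Int) + 1) ' ' = cs[k + 1] := by
        rw [PySem.List.pyGetD_eq_getElem cs ' ' (by omega) (by omega)]
        simp [show ((k : Int) + 1).toNat = k + 1 from by omega]
      have g2 : PySem.List.pyGetD cs ((k : Int) + 1 + 1) ' ' = cs[k + 2] := by
        rw [PySem.List.pyGetD_eq_getElem cs ' ' (by omega) (by omega)]
        simp [show ((k : Int) + 1 + 1).toNat = k + 2 from by omega]
      have hdropk : cs.drop k = cs[k] :: cs[k + 1] :: cs[k + 2] :: cs.drop (k + 3) := by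
        rw [List.drop_eq_getElem_cons hk0, List.drop_eq_getElem_cons hk1,
            List.drop_eq_getElem_cons hk2]
      have hdropk1 : cs.drop (k + 1) = cs[k + 1] :: cs[k + 2] :: cs.drop (k + 3) := by
        rw [List.drop_eq_getElem_cons hk1, List.drop_eq_getElem_cons hk2]
      have hrange : PySem.List.pyRange ((k : Int) + 1 + 1) ((cs.length : Int) - 1) 1
          = PySem.List.pyRange (((k + 1 : Nat) : Int) + 1) ((cs.length : Int) - 1) 1 := by
        push_cast; ring_nf
      rw [g0, g1, g2, hdropk]
      show (PySem.List.pyRange ((k : Int) + 1 + 1) ((cs.length : Int) - 1) 1).foldl _ _ = _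
      rw [hrange]
      have htri : pvTri (cs[k] :: cs[k + 1] :: cs[k + 2] :: cs.drop (k + 3))
          = (if cs[k] = cs[k + 1] ∧ cs[k + 1] = cs[k + 2] then
              (if cs[k + 1] = 'A' then
                ((pvTri (cs.drop (k + 1))).1 + 1, (pvTri (cs.drop (k + 1))).2)
               else ((pvTri (cs.drop (k + 1))).1, (pvTri (cs.drop (k + 1))).2 + 1))
             else pvTri (cs.drop (k + 1))) := by
        rw [hdropk1]; rfl
      rw [htri]
      split_ifs with h1 h2
      · rw [ih cs (k + 1) (a + 1) b (by omega)]
        simp only [Prod.mk.injEq]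
        exact ⟨by ring, trivial⟩
      · rw [ih cs (k + 1) a (b + 1) (by omega)]
        simp only [Prod.mk.injEq]
        exact ⟨trivial, by ring⟩
      · rw [ih cs (k + 1) a b (by omega)]

theorem A_char (colors : String) :
    winnerOfGame colors
      = decide ((pvTri colors.toList).1 - (pvTri colors.toList).2 ≥ 1) := by
  unfold winnerOfGame
  have h := A_loop colors.toList.length colors.toList 0 0 0 (by omega)
  simp only [Nat.cast_zero, zero_add, List.drop_zero] at h
  simp only [PySem.List.len_eq]
  rw [decide_eq_decide, h]

-- B's loop characterised via pvTri
theorem B_loop (cs : List Char) : ∀ (c : Char) (rl : Nat) (a b : Int), 1 ≤ rl →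
    pvFlush (cs.foldl pvStep ((a, b), some c, (rl : Int))).1
        (cs.foldl pvStep ((a, b), some c, (rl : Int))).2.1
        (cs.foldl pvStep ((a, b), some c, (rl : Int))).2.2
      = (a + (pvTri (List.replicate rl c ++ cs)).1,
         b + (pvTri (List.replicate rl c ++ cs)).2) := by
  induction cs with
  | nil =>
    intro c rl a b hrl
    simp only [List.foldl_nil, List.append_nil]
    rw [pvTri_replicate]
    simp only [pvFlush]
    split <;> simp
  | cons x t ih =>
    intro c rl a b hrl
    simp only [List.foldl_cons]
    by_cases hcx : c = x
    · subst hcx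
      have hstep : pvStep ((a, b), some c, (rl : Int)) c
          = ((a, b), some c, ((rl + 1 : Nat) : Int)) := by
        simp [pvStep]
      rw [hstep, ih c (rl + 1) a b (by omega)]
      have : List.replicate rl c ++ c :: t = List.replicate (rl + 1) c ++ t := by
        rw [List.replicate_succ' (n := rl)]; simp
      rw [this]
    · have hstep : pvStep ((a, b), some c, (rl : Int)) x
          = (pvFlush (a, b) (some c) (rl : Int), some x, ((1 : Nat) : Int)) := by
        simp [pvStep, hcx]
      rw [hstep,
        ih x 1 (pvFlush (a, b) (some c) (rl : Int)).1
          (pvFlush (a, b) (some c) (rl : Int)).2 (by omega)]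
      rw [pvTri_run rl c x t hcx]
      simp only [pvFlush, List.replicate_one, List.singleton_append]
      split <;> simp <;> ring_nf

theorem B_char (colors : String) :
    winnerOfGame_alt colors
      = decide ((pvTri colors.toList).1 - (pvTri colors.toList).2 ≥ 1) := by
  unfold winnerOfGame_alt
  cases hcs : colors.toList with
  | nil => simp [pvFlush, pvTri]
  | cons x t =>
    simp only [List.foldl_cons]
    have hstep : pvStep ((0, 0), none, 0) x = ((0, 0), some x, ((1 : Nat) : Int)) := by
      simp [pvStep, pvFlush]
    rw [decide_eq_decide, hstep, B_loop t x 1 0 0 (by omega)]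
    simp

-- ===== VERDICT (by name: the statement is the Claim_ definition above) =====
theorem winnerOfGame_spec : Claim_equal_winnerOfGame := by
  intro colors _
  unfold Spec_winnerOfGame
  rw [A_char, B_char]
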